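-- pv_equiv track=rewrite | github.com/CalebMathers/advent-of-code | 2015/day_5.py | check_nice_string
-- ===== SOURCE A (Python) =====
-- VOWELS = ["a", "e", "i", "o", "u"]
--
-- FORBIDDEN_STRINGS = ["ab", "cd", "pq", "xy"]
--
-- def check_nice_string(string_to_check: str) -> bool:
--     """Returns true if the string is 'nice', else returns false."""
--     vowel_count = 0
--     double_count = 0
--
--     for i, char in enumerate(string_to_check):
--         if char in VOWELS:
--             vowel_count += 1
--
--         if i != len(string_to_check) - 1:
--             if char == string_to_check[i + 1]:
--                 double_count += 1
--
--             if (char + string_to_check[i + 1]) in FORBIDDEN_STRINGS: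
--                 return False
--
--     if vowel_count >= 3 and double_count >= 1:
--         return True
--
--     return False
-- ===== SOURCE B (Python) =====
-- VOWELS = ["a", "e", "i", "o", "u"]
--
-- FORBIDDEN_STRINGS = ["ab", "cd", "pq", "xy"]
--
-- def check_nice_string(string_to_check: str) -> bool:
--     """Returns true if the string is 'nice', else returns false."""
--     s = string_to_check
--     return (sum(c in VOWELS for c in s) >= 3
--             and any(a == b for a, b in zip(s, s[1:]))
--             and not any(f in s for f in FORBIDDEN_STRINGS))
-- ===== Notes on version B (the rewrite author's own statement) =====
-- stated objective: simpler
-- what changed: Replaces the single indexed loop with counters and an early return by three independent whole-string predicates (a vowel count, an adjacent-pair scan via zip, and a substring test for each forbidden token, exact because the tokens have length 2) combined with logical and.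
import Mathlib
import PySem

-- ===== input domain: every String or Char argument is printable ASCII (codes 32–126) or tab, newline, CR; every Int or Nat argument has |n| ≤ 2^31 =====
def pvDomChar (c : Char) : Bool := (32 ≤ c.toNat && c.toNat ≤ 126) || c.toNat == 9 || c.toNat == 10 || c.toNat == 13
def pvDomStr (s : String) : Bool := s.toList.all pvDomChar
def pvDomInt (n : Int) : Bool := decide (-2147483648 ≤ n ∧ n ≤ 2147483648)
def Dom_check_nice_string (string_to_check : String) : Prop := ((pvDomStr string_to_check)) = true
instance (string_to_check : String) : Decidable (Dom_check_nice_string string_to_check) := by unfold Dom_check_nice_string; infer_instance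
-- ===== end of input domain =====

-- B replaces A's single indexed loop with counters and an early return by three independent
-- whole-string predicates (vowel count, adjacent-pair scan, substring test per forbidden token)
-- combined with logical and; objective: simpler.

-- ===== PORT A =====
def pvVOWELS : List Char := ['a', 'e', 'i', 'o', 'u']

def pvFORBIDDEN : List (List Char) := [['a','b'], ['c','d'], ['p','q'], ['x','y']]

-- the for-loop of A: rest = remaining characters, i = current index, vc/dc = the counters
def check_nice_go (l : List Char) : List Char → Nat → Nat → Nat → Bool
  | [], _, vc, dc => decide (3 ≤ vc) && decide (1 ≤ dc)
  | c :: rs, i, vc, dc =>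
    let vc' := if pvVOWELS.contains c then vc + 1 else vc
    if i ≠ l.length - 1 then
      match PySem.List.pyGet? l ((i : Int) + 1) with
      | none => false  -- unreachable inside the loop: i ≠ len-1 puts i+1 in range
      | some nxt =>
        let dc' := if c == nxt then dc + 1 else dc
        if pvFORBIDDEN.contains [c, nxt] then false
        else check_nice_go l rs (i + 1) vc' dc'
    else check_nice_go l rs (i + 1) vc' dc

def check_nice_string (string_to_check : String) : Bool :=
  check_nice_go string_to_check.toList string_to_check.toList 0 0 0

-- ===== PORT B =====
def check_nice_string_alt (string_to_check : String) : Bool :=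
  let l := string_to_check.toList
  decide (3 ≤ l.countP (fun c => pvVOWELS.contains c)) &&       -- sum(c in VOWELS for c in s) >= 3
  (l.zip (l.drop 1)).any (fun p => p.1 == p.2) &&               -- any(a == b for a, b in zip(s, s[1:]))
  !(pvFORBIDDEN.any (fun f => PySem.Chars.isIn f l))            -- not any(f in s for f in FORBIDDEN_STRINGS)

-- ===== PRECONDITION & SPEC =====
def Spec_check_nice_string (string_to_check : String) (out : Bool) : Prop := out = check_nice_string_alt string_to_check
instance (string_to_check : String) (out : Bool) : Decidable (Spec_check_nice_string string_to_check out) := by unfold Spec_check_nice_string; infer_instance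

-- ===== CLAIM (what is proved, stated in full; the proofs are below) =====
def Claim_equal_check_nice_string : Prop := ∀ (string_to_check : String), Dom_check_nice_string string_to_check → Spec_check_nice_string string_to_check (check_nice_string string_to_check)

-- ===== LEMMAS AND PROOFS =====

-- A's loop expressed as structural recursion on the remaining characters only
def niceRec : List Char → Nat → Nat → Bool
  | [], vc, dc => decide (3 ≤ vc) && decide (1 ≤ dc)
  | [c], vc, dc => decide (3 ≤ (if pvVOWELS.contains c then vc + 1 else vc)) && decide (1 ≤ dc)
  | c :: d :: rs, vc, dc =>
    if pvFORBIDDEN.contains [c, d] then false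
    else niceRec (d :: rs) (if pvVOWELS.contains c then vc + 1 else vc)
                 (if c == d then dc + 1 else dc)

lemma check_nice_go_eq_niceRec (l : List Char) :
    ∀ (rest : List Char) (i vc dc : Nat), rest = l.drop i →
      check_nice_go l rest i vc dc = niceRec rest vc dc := by
  intro rest
  induction rest with
  | nil => intro i vc dc _; rfl
  | cons c rs ih =>
    intro i vc dc h
    have hi : i < l.length := by
      by_contra hge
      simp [List.drop_eq_nil_of_le (Nat.le_of_not_lt hge)] at h
    have hrs : rs = l.drop (i + 1) := by
      have := congrArg List.tail h
      simpa [List.tail_drop] using this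
    cases rs with
    | nil =>
      have hlast : i = l.length - 1 := by
        have : l.length - i = ([c] : List Char).length := by rw [h, List.length_drop]
        simp at this; omega
      rw [check_nice_go, if_neg (by simp [hlast])]
      rfl
    | cons d rs' =>
      have hne : i ≠ l.length - 1 := by
        have : l.length - i = (c :: d :: rs').length := by rw [h, List.length_drop]
        simp at this; omega
      have hget : PySem.List.pyGet? l ((i : Int) + 1) = some d := by
        have hd : l[i + 1]? = some d := by
          have := congrArg List.head? hrs.symm
          simpa [List.head?_drop] using this
        have hcast : ((i : Int) + 1) = ((i + 1 : Nat) : Int) := by push_cast; ring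
        rw [hcast, PySem.List.pyGet?_natCast]; exact hd
      rw [check_nice_go, if_pos hne, hget]
      by_cases hf : pvFORBIDDEN.contains [c, d]
      · simp only [hf, if_true, niceRec]
      · simp only [hf, niceRec, ih (i + 1) _ _ hrs]

-- the value of the loop: false iff a forbidden adjacent pair occurs, else the two counts
lemma niceRec_spec (rest : List Char) (vc dc : Nat) :
    niceRec rest vc dc =
      if (rest.zip rest.tail).any (fun p => pvFORBIDDEN.contains [p.1, p.2]) then false
      else decide (3 ≤ vc + rest.countP (fun c => pvVOWELS.contains c)) &&
           decide (1 ≤ dc + (rest.zip rest.tail).countP (fun p => p.1 == p.2)) := by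
  fun_induction niceRec rest vc dc with
  | case1 vc dc => simp
  | case2 c vc dc => by_cases h : c ∈ pvVOWELS <;> simp [h]
  | case3 c d rs vc dc hf =>
    have hm : [c, d] ∈ pvFORBIDDEN := by simpa using hf
    simp [List.zip_cons_cons, hm]
  | case4 c d rs vc dc hf ih =>
    rw [ih]
    simp only [List.zip_cons_cons, List.tail_cons, List.any_cons, List.countP_cons, hf,
      Bool.false_or]
    split
    · rfl
    · congr 1
      · rw [decide_eq_decide]
        by_cases h1 : c ∈ pvVOWELS <;> simp [h1] <;> omega
      · rw [decide_eq_decide]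
        by_cases h2 : c = d <;> simp [h2] <;> omega

-- a two-character substring occurs iff it occurs as an adjacent pair
lemma infix_pair_iff (x y : Char) : ∀ (l : List Char),
    ([x, y] <:+: l) ↔ (x, y) ∈ l.zip l.tail
  | [] => by simp
  | [a] => by
      simp only [List.tail_cons, List.zip_nil_right, List.not_mem_nil, iff_false]
      intro h
      have := h.length_le
      simp at this
  | a :: b :: t => by
      rw [List.infix_cons_iff, infix_pair_iff x y (b :: t)]
      simp [List.cons_prefix_cons, Prod.ext_iff]

-- B's forbidden-substring test agrees with the adjacent-pair test A performs
lemma forbidden_any_eq (l : List Char) :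
    pvFORBIDDEN.any (fun f => PySem.Chars.isIn f l) =
      (l.zip l.tail).any (fun p => pvFORBIDDEN.contains [p.1, p.2]) := by
  rw [Bool.eq_iff_iff]
  simp only [pvFORBIDDEN, List.any_cons, List.any_nil, Bool.or_eq_true, Bool.or_false,
    PySem.Chars.isIn_iff_infix, infix_pair_iff, List.any_eq_true, List.contains_eq_mem,
    List.mem_cons, List.not_mem_nil, or_false, decide_eq_true_eq, List.cons.injEq, and_true]
  constructor
  · rintro (h | h | h | h) <;> exact ⟨_, h, by simp⟩
  · rintro ⟨⟨px, py⟩, hp, ⟨h1, h2⟩ | ⟨h1, h2⟩ | ⟨h1, h2⟩ | ⟨h1, h2⟩⟩ <;>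
      subst h1 <;> subst h2 <;> tauto

lemma any_eq_one_le_countP (l : List (Char × Char)) (p : Char × Char → Bool) :
    l.any p = decide (1 ≤ l.countP p) := by
  rw [Bool.eq_iff_iff]
  simp [List.any_eq_true, Nat.one_le_iff_ne_zero, List.countP_eq_zero]

-- ===== VERDICT (by name: the statement is the Claim_ definition above) =====
theorem check_nice_string_spec : Claim_equal_check_nice_string := by
  intro s _
  show check_nice_string s = check_nice_string_alt s
  simp only [check_nice_string, check_nice_string_alt]
  rw [check_nice_go_eq_niceRec s.toList s.toList 0 0 0 (by simp), niceRec_spec,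
    forbidden_any_eq, List.drop_one,
    any_eq_one_le_countP (s.toList.zip s.toList.tail) (fun p => p.1 == p.2)]
  cases hA : ((s.toList.zip s.toList.tail).any fun p => pvFORBIDDEN.contains [p.1, p.2])
  · simp [hA]
  · simp [hA]
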